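-- pv_equiv track=rewrite | github.com/nivi1412/dsa | practice/graph24.py | DFS
-- ===== SOURCE A (Python) =====
-- def DFS(finaldict,node,quiet,memo):
-- 	if node in memo:
-- 		return memo[node]
-- 	min_val=(quiet[node],node)
-- 	key=(node,quiet[node])
-- 	for next_node in finaldict[key]:
-- 		val=DFS(finaldict,next_node,quiet,memo)
-- 		if val < min_val:
-- 			min_val=val
-- 	memo[node]=min_val
-- 	return min_val
-- ===== SOURCE B (Python) =====
-- def DFS(finaldict, node, quiet, memo):
--     if node in memo:
--         return memo[node]
--     # iterative reachability closure, then one min pass (no recursion, no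
--     # per-node memo writes; only memo[node] is written, like A's final write)
--     seen = [node]
--     seen_set = {node}
--     i = 0
--     while i < len(seen):
--         n = seen[i]
--         i += 1
--         if n not in memo:
--             for s in finaldict[(n, quiet[n])]:
--                 if s not in seen_set:
--                     seen_set.add(s)
--                     seen.append(s)
--     best = None
--     for n in seen:
--         cand = memo[n] if n in memo else (quiet[n], n)
--         if best is None or cand < best:
--             best = cand
--     memo[node] = best
--     return best
-- ===== Notes on version B (the rewrite author's own statement) =====
-- stated objective: alternative
-- what changed: Replaces the memoized recursive post-order DFS by an iterative worklist that first computes the whole reachable-node closure and then takes the minimum (quiet, node) / memo contribution in one linear pass, with no recursion and no intermediate memo writes.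
import Mathlib
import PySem

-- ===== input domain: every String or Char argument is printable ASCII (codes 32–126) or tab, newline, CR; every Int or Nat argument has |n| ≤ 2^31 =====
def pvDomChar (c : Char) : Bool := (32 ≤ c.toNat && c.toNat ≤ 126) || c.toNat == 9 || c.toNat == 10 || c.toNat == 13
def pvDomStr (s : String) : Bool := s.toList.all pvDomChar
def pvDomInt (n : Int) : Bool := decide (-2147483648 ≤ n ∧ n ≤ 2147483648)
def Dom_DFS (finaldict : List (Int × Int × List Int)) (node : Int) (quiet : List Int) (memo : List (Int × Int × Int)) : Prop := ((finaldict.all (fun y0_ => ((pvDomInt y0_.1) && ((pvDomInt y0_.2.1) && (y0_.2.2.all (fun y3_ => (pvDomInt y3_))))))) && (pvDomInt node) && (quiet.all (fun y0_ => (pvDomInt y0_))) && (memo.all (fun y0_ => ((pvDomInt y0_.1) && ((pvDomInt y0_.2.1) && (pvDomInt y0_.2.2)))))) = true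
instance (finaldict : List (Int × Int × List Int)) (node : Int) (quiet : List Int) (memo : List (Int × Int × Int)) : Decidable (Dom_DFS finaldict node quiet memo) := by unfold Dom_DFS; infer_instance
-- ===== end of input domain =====

-- B replaces A's memoized recursive DFS by an iterative reachability closure followed by a single
-- min pass (objective: alternative decomposition, same asymptotic cost). Equivalence is about the
-- RETURN value: A writes memo entries for every visited node, B writes only memo[node].

-- ===== shared helpers (Python-dict lookups and the successor map) =====
-- finaldict is a Python dict keyed by the pair (node, quiet[node]); lookup = first match
def fdLookup (fd : List (Int × Int × List Int)) (k : Int × Int) : Option (List Int) :=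
  (PySem.Dict.mk (fd.map (fun e => ((e.1, e.2.1), e.2.2)))).get? k

def memoDict (memo : List (Int × Int × Int)) : PySem.Dict Int (Int × Int) :=
  PySem.Dict.mk memo

-- Python's '<' on pairs of ints (lexicographic)
def pyLtP (a b : Int × Int) : Bool := decide (a.1 < b.1 ∨ (a.1 = b.1 ∧ a.2 < b.2))

-- a syntactic universe containing every node the algorithms can ever touch; fuelN is a
-- totalization guard (recursion/loop depth bound), not part of either Python's logic
def nodeUniv (fd : List (Int × Int × List Int)) (node : Int) : List Int :=
  node :: fd.flatMap (fun e => e.2.2)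

def fuelN (fd : List (Int × Int × List Int)) (node : Int) : ℕ :=
  (nodeUniv fd node).toFinset.card + 1

-- quiet[n] then finaldict[(n, quiet[n])]; none exactly where the Python raises
def succsOf (fd : List (Int × Int × List Int)) (quiet : List Int) (n : Int) : Option (List Int) :=
  match PySem.List.pyGet? quiet n with
  | none => none
  | some q => fdLookup fd (n, q)

-- ===== PORT A ===== (memoized recursion, memo threaded; none = exception / fuel exhaustion,
-- both only outside Pre_)
def dfsA (fd : List (Int × Int × List Int)) (quiet : List Int) :
    ℕ → Int → PySem.Dict Int (Int × Int) → Option ((Int × Int) × PySem.Dict Int (Int × Int))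
  | 0, _, _ => none
  | (f+1), n, d =>
    match d.get? n with
    | some v => some (v, d)
    | none =>
      match PySem.List.pyGet? quiet n with
      | none => none
      | some q =>
        match fdLookup fd (n, q) with
        | none => none
        | some ss =>
          match ss.foldl (fun acc s =>
            match acc with
            | none => none
            | some (mv, d') =>
              match dfsA fd quiet f s d' with
              | none => none
              | some (v, d'') => some ((if pyLtP v mv then v else mv), d''))
            (some (((q, n) : Int × Int), d)) with
          | none => none
          | some (mv, d') => some (mv, d'.insert n mv)

def DFS (finaldict : List (Int × Int × List Int)) (node : Int) (quiet : List Int) (memo : List (Int × Int × Int)) : Int × Int :=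
  match dfsA finaldict quiet (fuelN finaldict node) node (memoDict memo) with
  | some (v, _) => v
  | none => (0, 0)

-- ===== PORT B ===== (Source B: worklist closure over `seen`, then one min pass)
def bfsLoop (fd : List (Int × Int × List Int)) (quiet : List Int) (md : PySem.Dict Int (Int × Int)) :
    ℕ → List Int → PySem.Set Int → ℕ → List Int
  | 0, seen, _, _ => seen
  | (f+1), seen, sset, i =>
    if i < seen.length then
      let n := seen.getD i 0
      let p :=
        match md.get? n with
        | some _ => (seen, sset)
        | none => ((succsOf fd quiet n).getD []).foldl
            (fun p s => if PySem.Set.contains p.2 s then p else (p.1 ++ [s], PySem.Set.add p.2 s)) (seen, sset)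
      bfsLoop fd quiet md f p.1 p.2 (i+1)
    else seen

-- memo[n] if n in memo else (quiet[n], n); the default 0 is only read where Python would raise
def contribD (quiet : List Int) (md : PySem.Dict Int (Int × Int)) (n : Int) : Int × Int :=
  match md.get? n with
  | some v => v
  | none => (PySem.List.pyGetD quiet n 0, n)

def DFS_alt (finaldict : List (Int × Int × List Int)) (node : Int) (quiet : List Int) (memo : List (Int × Int × Int)) : Int × Int :=
  match (memoDict memo).get? node with
  | some v => v
  | none =>
    let seen := bfsLoop finaldict quiet (memoDict memo) (fuelN finaldict node) [node] (PySem.Set.ofList [node]) 0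
    match seen.foldl (fun best n =>
        let cand := contribD quiet (memoDict memo) n
        match best with
        | none => some cand
        | some b => some (if pyLtP cand b then cand else b)) none with
    | some v => v
    | none => (0, 0)

-- ===== PRECONDITION & SPEC =====
-- one step of graph reachability: nodes already in memo are sinks
def stepF (fd : List (Int × Int × List Int)) (quiet : List Int) (md : PySem.Dict Int (Int × Int)) (S : Finset Int) : Finset Int :=
  S ∪ S.biUnion (fun n => if (md.get? n).isSome then ∅ else ((succsOf fd quiet n).getD []).toFinset)

def reachF (fd : List (Int × Int × List Int)) (quiet : List Int) (md : PySem.Dict Int (Int × Int)) (N : ℕ) (x : Int) : Finset Int :=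
  (stepF fd quiet md)^[N] {x}

-- Pre_ excludes exactly the inputs where the Python A raises: some node reachable from `node`
-- (through nodes not in memo) is neither memoized nor a valid key (IndexError/KeyError), or a
-- reachable non-memoized node lies on a cycle (infinite recursion / RecursionError).
def Pre_DFS (finaldict : List (Int × Int × List Int)) (node : Int) (quiet : List Int) (memo : List (Int × Int × Int)) : Prop :=
  ∀ n ∈ reachF finaldict quiet (memoDict memo) (fuelN finaldict node) node,
    ((memoDict memo).get? n).isSome = true ∨
      ((succsOf finaldict quiet n).isSome = true ∧
        ∀ s ∈ (succsOf finaldict quiet n).getD [],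
          n ∉ reachF finaldict quiet (memoDict memo) (fuelN finaldict node) s)

instance (finaldict : List (Int × Int × List Int)) (node : Int) (quiet : List Int) (memo : List (Int × Int × Int)) : Decidable (Pre_DFS finaldict node quiet memo) := by unfold Pre_DFS; infer_instance

def pvWitness_DFS : (List (Int × Int × List Int)) × Int × List Int × (List (Int × Int × Int)) :=
  ([(0, 5, [1]), (1, 3, [])], 0, [5, 3], [])

def Spec_DFS (finaldict : List (Int × Int × List Int)) (node : Int) (quiet : List Int) (memo : List (Int × Int × Int)) (out : Int × Int) : Prop := out = DFS_alt finaldict node quiet memo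
instance (finaldict : List (Int × Int × List Int)) (node : Int) (quiet : List Int) (memo : List (Int × Int × Int)) (out : Int × Int) : Decidable (Spec_DFS finaldict node quiet memo out) := by unfold Spec_DFS; infer_instance

-- ===== CLAIM (what is proved, stated in full; the proofs are below) =====
def Claim_equal_DFS : Prop := ∀ (finaldict : List (Int × Int × List Int)) (node : Int) (quiet : List Int) (memo : List (Int × Int × Int)), Dom_DFS finaldict node quiet memo → Pre_DFS finaldict node quiet memo → Spec_DFS finaldict node quiet memo (DFS finaldict node quiet memo)

-- ===== LEMMAS AND PROOFS =====

-- the memo-free value recursion both programs compute (proof-only device)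
def tvF (fd : List (Int × Int × List Int)) (quiet : List Int) (md : PySem.Dict Int (Int × Int)) :
    ℕ → Int → Option (Int × Int)
  | 0, _ => none
  | (f+1), n =>
    match md.get? n with
    | some v => some v
    | none =>
      match PySem.List.pyGet? quiet n with
      | none => none
      | some q =>
        match fdLookup fd (n, q) with
        | none => none
        | some ss =>
          ss.foldl (fun acc s =>
            match acc with
            | none => none
            | some mv =>
              match tvF fd quiet md f s with
              | none => none
              | some v => some (if pyLtP v mv then v else mv))
            (some ((q, n) : Int × Int))


-- generic: an Option-fold that is strict in `none`
theorem foldl_none_of {α β : Type} (g : Option α → β → Option α) (h : ∀ b, g none b = none) :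
    ∀ l : List β, l.foldl g none = none := by
  intro l; induction l with
  | nil => rfl
  | cons x xs ih => simpa [List.foldl, h x] using ih

theorem ite_pyLtP (v mv : Int × Int) :
    (if pyLtP v mv then v else mv) = ofLex (min (toLex mv) (toLex v)) := by
  have hlt : pyLtP v mv = true ↔ toLex v < toLex mv := by
    simp [pyLtP, Prod.Lex.lt_iff]
  by_cases h : pyLtP v mv = true
  · have := hlt.mp h
    simp [h, min_def, (not_le.mpr this : ¬ toLex mv ≤ toLex v)]
  · have hle : toLex mv ≤ toLex v := not_lt.mp (fun c => h (hlt.mpr c))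
    simp [h, hle]

-- equation helpers for tvF
theorem tvF_memo (fd : List (Int × Int × List Int)) (quiet : List Int) (md : PySem.Dict Int (Int × Int))
    (f : ℕ) (n : Int) (v : Int × Int) (h : md.get? n = some v) : tvF fd quiet md (f+1) n = some v := by
  rw [tvF, h]

theorem tvF_go (fd : List (Int × Int × List Int)) (quiet : List Int) (md : PySem.Dict Int (Int × Int))
    (f : ℕ) (n : Int) (q : Int) (ss : List Int) (h1 : md.get? n = none)
    (h2 : PySem.List.pyGet? quiet n = some q) (h3 : fdLookup fd (n, q) = some ss) :
    tvF fd quiet md (f+1) n =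
      ss.foldl (fun acc s =>
        match acc with
        | none => none
        | some mv =>
          match tvF fd quiet md f s with
          | none => none
          | some v => some (if pyLtP v mv then v else mv)) (some ((q, n) : Int × Int)) := by
  rw [tvF, h1, h2]
  simp only []
  rw [h3]

theorem tvF_zero (fd : List (Int × Int × List Int)) (quiet : List Int) (md : PySem.Dict Int (Int × Int))
    (n : Int) : tvF fd quiet md 0 n = none := rfl

theorem tvF_err1 (fd : List (Int × Int × List Int)) (quiet : List Int) (md : PySem.Dict Int (Int × Int))
    (f : ℕ) (n : Int) (h1 : md.get? n = none) (h2 : PySem.List.pyGet? quiet n = none) :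
    tvF fd quiet md (f+1) n = none := by
  rw [tvF, h1, h2]

theorem tvF_err2 (fd : List (Int × Int × List Int)) (quiet : List Int) (md : PySem.Dict Int (Int × Int))
    (f : ℕ) (n : Int) (q : Int) (h1 : md.get? n = none)
    (h2 : PySem.List.pyGet? quiet n = some q) (h3 : fdLookup fd (n, q) = none) :
    tvF fd quiet md (f+1) n = none := by
  rw [tvF, h1, h2]
  simp only []
  rw [h3]

-- tvF is monotone in fuel
theorem tvF_mono (fd : List (Int × Int × List Int)) (quiet : List Int) (md : PySem.Dict Int (Int × Int)) :
    ∀ f n v, tvF fd quiet md f n = some v → tvF fd quiet md (f+1) n = some v := by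
  intro f
  induction f with
  | zero => intro n v h; simp [tvF_zero] at h
  | succ f ih =>
    intro n v h
    rcases hmd : md.get? n with _ | w
    case some =>
      rw [tvF_memo fd quiet md f n w hmd] at h
      rw [tvF_memo fd quiet md (f+1) n w hmd]
      exact h
    rcases hq : PySem.List.pyGet? quiet n with _ | q
    case none.none => rw [tvF_err1 fd quiet md f n hmd hq] at h; exact absurd h (by simp)
    rcases hfd : fdLookup fd (n, q) with _ | ss
    case none => rw [tvF_err2 fd quiet md f n q hmd hq hfd] at h; exact absurd h (by simp)
    rw [tvF_go fd quiet md f n q ss hmd hq hfd] at h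
    rw [tvF_go fd quiet md (f+1) n q ss hmd hq hfd]
    clear hmd hq hfd
    generalize hinit : ((q, n) : Int × Int) = init at h ⊢
    clear hinit
    induction ss generalizing init with
    | nil => exact h
    | cons s ssx ihs =>
      simp only [List.foldl] at h ⊢
      rcases hts : tvF fd quiet md f s with _ | vs
      · rw [hts] at h
        rw [foldl_none_of _ (fun _ => rfl)] at h
        exact absurd h (by simp)
      · rw [hts] at h
        rw [ih s vs hts]
        exact ihs _ h

theorem tvF_le (fd : List (Int × Int × List Int)) (quiet : List Int) (md : PySem.Dict Int (Int × Int))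
    (f g : ℕ) (n : Int) (v : Int × Int) (hfg : f ≤ g) (h : tvF fd quiet md f n = some v) :
    tvF fd quiet md g n = some v := by
  obtain ⟨k, rfl⟩ : ∃ k, g = f + k := ⟨g - f, by omega⟩
  clear hfg
  induction k with
  | zero => exact h
  | succ k ih => exact tvF_mono fd quiet md (f+k) n v ih

theorem tvF_agree (fd : List (Int × Int × List Int)) (quiet : List Int) (md : PySem.Dict Int (Int × Int))
    (f g : ℕ) (n : Int) (v w : Int × Int) (h1 : tvF fd quiet md f n = some v)
    (h2 : tvF fd quiet md g n = some w) : v = w := by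
  have a1 := tvF_le fd quiet md f (max f g) n v (le_max_left f g) h1
  have a2 := tvF_le fd quiet md g (max f g) n w (le_max_right f g) h2
  rw [a1] at a2
  exact Option.some_inj.mp a2

-- equation helpers for dfsA
theorem dfsA_memo (fd : List (Int × Int × List Int)) (quiet : List Int) (f : ℕ) (n : Int)
    (d : PySem.Dict Int (Int × Int)) (v : Int × Int) (h : d.get? n = some v) :
    dfsA fd quiet (f+1) n d = some (v, d) := by
  rw [dfsA, h]

theorem dfsA_go (fd : List (Int × Int × List Int)) (quiet : List Int) (f : ℕ) (n : Int)
    (d : PySem.Dict Int (Int × Int)) (q : Int) (ss : List Int) (h1 : d.get? n = none)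
    (h2 : PySem.List.pyGet? quiet n = some q) (h3 : fdLookup fd (n, q) = some ss) :
    dfsA fd quiet (f+1) n d =
      match ss.foldl (fun acc s =>
          match acc with
          | none => none
          | some (mv, d') =>
            match dfsA fd quiet f s d' with
            | none => none
            | some (v, d'') => some ((if pyLtP v mv then v else mv), d''))
        (some (((q, n) : Int × Int), d)) with
      | none => none
      | some (mv, d') => some (mv, d'.insert n mv) := by
  rw [dfsA, h1, h2]
  simp only []
  rw [h3]

def GoodD (fd : List (Int × Int × List Int)) (quiet : List Int) (md d : PySem.Dict Int (Int × Int)) : Prop :=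
  (∀ k v, md.get? k = some v → d.get? k = some v) ∧
  (∀ k v, d.get? k = some v → ∃ g, tvF fd quiet md g k = some v)

theorem dfsA_sim (fd : List (Int × Int × List Int)) (quiet : List Int) (md : PySem.Dict Int (Int × Int)) :
    ∀ f n d v, GoodD fd quiet md d → tvF fd quiet md f n = some v →
      ∃ d', dfsA fd quiet f n d = some (v, d') ∧ GoodD fd quiet md d' := by
  intro f
  induction f with
  | zero => intro n d v _ h; simp [tvF_zero] at h
  | succ f ih =>
    intro n d v hG h
    rcases hd : d.get? n with _ | w
    case some =>
      obtain ⟨g, hg⟩ := hG.2 n w hd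
      have hv : v = w := tvF_agree fd quiet md (f+1) g n v w h hg
      exact ⟨d, by rw [dfsA_memo fd quiet f n d w hd, hv], hG⟩
    have hmd : md.get? n = none := by
      rcases hmde : md.get? n with _ | u
      · rfl
      · have := hG.1 n u hmde; rw [hd] at this; exact absurd this (by simp)
    rcases hq : PySem.List.pyGet? quiet n with _ | q
    case none.none => rw [tvF_err1 fd quiet md f n hmd hq] at h; exact absurd h (by simp)
    rcases hfd : fdLookup fd (n, q) with _ | ss
    case none => rw [tvF_err2 fd quiet md f n q hmd hq hfd] at h; exact absurd h (by simp)
    rw [tvF_go fd quiet md f n q ss hmd hq hfd] at h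
    rw [dfsA_go fd quiet f n d q ss hd hq hfd]
    -- fold simulation
    have fold_sim : ∀ (l : List Int) (init : Int × Int) (d0 : PySem.Dict Int (Int × Int)) (r : Int × Int),
        GoodD fd quiet md d0 →
        l.foldl (fun acc s =>
          match acc with
          | none => none
          | some mv =>
            match tvF fd quiet md f s with
            | none => none
            | some v => some (if pyLtP v mv then v else mv)) (some init) = some r →
        ∃ d', l.foldl (fun acc s =>
          match acc with
          | none => none
          | some (mv, d') =>
            match dfsA fd quiet f s d' with
            | none => none
            | some (v, d'') => some ((if pyLtP v mv then v else mv), d''))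
          (some (init, d0)) = some (r, d') ∧ GoodD fd quiet md d' := by
      intro l
      induction l with
      | nil =>
        intro init d0 r hG0 hfold
        simp only [List.foldl] at hfold
        obtain rfl := Option.some_inj.mp hfold
        exact ⟨d0, rfl, hG0⟩
      | cons s lx ihl =>
        intro init d0 r hG0 hfold
        simp only [List.foldl] at hfold ⊢
        rcases hts : tvF fd quiet md f s with _ | vs
        · rw [hts] at hfold
          rw [foldl_none_of _ (fun _ => rfl)] at hfold
          exact absurd hfold (by simp)
        · rw [hts] at hfold
          obtain ⟨d1, hd1, hG1⟩ := ih s d0 vs hG0 hts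
          rw [hd1]
          exact ihl _ d1 r hG1 hfold
    obtain ⟨d', hd', hG'⟩ := fold_sim ss (q, n) d v hG h
    rw [hd']
    refine ⟨d'.insert n v, rfl, ?_, ?_⟩
    · intro k v' hk
      rw [PySem.Dict.get?_insert]
      split
      · rename_i hkn; rw [hkn] at hk; rw [hmd] at hk; exact absurd hk (by simp)
      · exact hG'.1 k v' hk
    · intro k v' hk
      rw [PySem.Dict.get?_insert] at hk
      by_cases hkn : k = n
      · rw [if_pos hkn] at hk
        obtain rfl := Option.some_inj.mp hk
        refine ⟨f+1, ?_⟩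
        rw [hkn]
        rw [tvF_go fd quiet md f n q ss hmd hq hfd]
        exact h
      · rw [if_neg hkn] at hk
        exact hG'.2 k v' hk

theorem DFS_eq_tv (fd : List (Int × Int × List Int)) (node : Int) (quiet : List Int)
    (memo : List (Int × Int × Int)) (v : Int × Int)
    (h : tvF fd quiet (memoDict memo) (fuelN fd node) node = some v) :
    DFS fd node quiet memo = v := by
  have hG : GoodD fd quiet (memoDict memo) (memoDict memo) :=
    ⟨fun k v h => h, fun k v h => ⟨1, tvF_memo fd quiet (memoDict memo) 0 k v h⟩⟩
  obtain ⟨d', hd', _⟩ := dfsA_sim fd quiet (memoDict memo) (fuelN fd node) node (memoDict memo) v hG h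
  rw [DFS, hd']

-- ===== graph lemmas =====
theorem step_subset (fd : List (Int × Int × List Int)) (quiet : List Int) (md : PySem.Dict Int (Int × Int))
    (S : Finset Int) : S ⊆ stepF fd quiet md S := Finset.subset_union_left

theorem step_mono (fd : List (Int × Int × List Int)) (quiet : List Int) (md : PySem.Dict Int (Int × Int))
    (S T : Finset Int) (h : S ⊆ T) : stepF fd quiet md S ⊆ stepF fd quiet md T :=
  Finset.union_subset_union h (Finset.biUnion_subset_biUnion_of_subset_left _ h)

theorem fdLookup_mem (fd : List (Int × Int × List Int)) (k : Int × Int) (ss : List Int)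
    (h : fdLookup fd k = some ss) : ∃ e ∈ fd, ss = e.2.2 := by
  induction fd with
  | nil => simp [fdLookup, PySem.Dict.get?] at h
  | cons e fd' ih =>
    rw [fdLookup, List.map_cons, PySem.Dict.get?_mk_cons] at h
    by_cases hk : ((e.1, e.2.1) == k) = true
    · rw [if_pos hk] at h
      exact ⟨e, by simp, (Option.some_inj.mp h).symm⟩
    · rw [if_neg hk] at h
      obtain ⟨e', he', hss⟩ := ih h
      exact ⟨e', by simp [he'], hss⟩

theorem succs_mem_univ (fd : List (Int × Int × List Int)) (node : Int) (quiet : List Int)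
    (n s : Int) (h : s ∈ (succsOf fd quiet n).getD []) : s ∈ (nodeUniv fd node).toFinset := by
  rcases hso : succsOf fd quiet n with _ | ss
  · rw [hso] at h; simp at h
  · rw [hso] at h
    simp only [Option.getD_some] at h
    rw [succsOf] at hso
    rcases hq : PySem.List.pyGet? quiet n with _ | q
    · rw [hq] at hso; exact absurd hso (by simp)
    · rw [hq] at hso
      obtain ⟨e, he, rfl⟩ := fdLookup_mem fd (n, q) ss hso
      simp only [nodeUniv, List.toFinset_cons, Finset.mem_insert, List.mem_toFinset]
      right
      exact List.mem_flatMap.mpr ⟨e, he, h⟩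

theorem step_univ (fd : List (Int × Int × List Int)) (node : Int) (quiet : List Int)
    (md : PySem.Dict Int (Int × Int)) (S : Finset Int) (h : S ⊆ (nodeUniv fd node).toFinset) :
    stepF fd quiet md S ⊆ (nodeUniv fd node).toFinset := by
  refine Finset.union_subset h (Finset.biUnion_subset.mpr ?_)
  intro n _
  split
  · exact Finset.empty_subset _
  · intro s hs
    exact succs_mem_univ fd node quiet n s (List.mem_toFinset.mp hs)

theorem iterate_univ (fd : List (Int × Int × List Int)) (node : Int) (quiet : List Int)
    (md : PySem.Dict Int (Int × Int)) (S : Finset Int) (h : S ⊆ (nodeUniv fd node).toFinset) :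
    ∀ k, (stepF fd quiet md)^[k] S ⊆ (nodeUniv fd node).toFinset := by
  intro k
  induction k with
  | zero => exact h
  | succ k ih => rw [Function.iterate_succ_apply']; exact step_univ fd node quiet md _ ih

theorem iterate_succ_sub (fd : List (Int × Int × List Int)) (quiet : List Int)
    (md : PySem.Dict Int (Int × Int)) (S : Finset Int) (k : ℕ) :
    (stepF fd quiet md)^[k] S ⊆ (stepF fd quiet md)^[k+1] S := by
  rw [Function.iterate_succ_apply']
  exact step_subset fd quiet md _

theorem iterate_le_sub (fd : List (Int × Int × List Int)) (quiet : List Int)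
    (md : PySem.Dict Int (Int × Int)) (S : Finset Int) (k m : ℕ) (h : k ≤ m) :
    (stepF fd quiet md)^[k] S ⊆ (stepF fd quiet md)^[m] S := by
  obtain ⟨j, rfl⟩ : ∃ j, m = k + j := ⟨m - k, by omega⟩
  clear h
  induction j with
  | zero => exact subset_rfl
  | succ j ih => exact ih.trans (iterate_succ_sub fd quiet md S (k+j))

theorem fixed_propagate (fd : List (Int × Int × List Int)) (quiet : List Int)
    (md : PySem.Dict Int (Int × Int)) (S : Finset Int) (j : ℕ)
    (h : (stepF fd quiet md)^[j] S = (stepF fd quiet md)^[j+1] S) :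
    ∀ m, j ≤ m → (stepF fd quiet md)^[m] S = (stepF fd quiet md)^[j] S := by
  intro m hm
  obtain ⟨k, rfl⟩ : ∃ k, m = j + k := ⟨m - j, by omega⟩
  clear hm
  induction k with
  | zero => rfl
  | succ k ih =>
    have : (j + (k+1)) = (j + k) + 1 := by omega
    rw [this, Function.iterate_succ_apply', ih]
    exact ((Function.iterate_succ_apply' (stepF fd quiet md) j S).symm).trans h.symm

theorem exists_fix (fd : List (Int × Int × List Int)) (node : Int) (quiet : List Int)
    (md : PySem.Dict Int (Int × Int)) (x : Int) (hx : x ∈ (nodeUniv fd node).toFinset) :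
    ∃ j ≤ (nodeUniv fd node).toFinset.card,
      (stepF fd quiet md)^[j] ({x} : Finset Int) = (stepF fd quiet md)^[j+1] ({x} : Finset Int) := by
  have key : ∀ k : ℕ, (∃ j ≤ k, (stepF fd quiet md)^[j] ({x} : Finset Int) = (stepF fd quiet md)^[j+1] ({x} : Finset Int)) ∨
      k + 1 ≤ ((stepF fd quiet md)^[k] ({x} : Finset Int)).card := by
    intro k
    induction k with
    | zero => right; simp
    | succ k ih =>
      rcases ih with ⟨j, hj, hfix⟩ | hcard
      · exact Or.inl ⟨j, by omega, hfix⟩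
      · by_cases heq : (stepF fd quiet md)^[k] ({x} : Finset Int) = (stepF fd quiet md)^[k+1] ({x} : Finset Int)
        · exact Or.inl ⟨k, by omega, heq⟩
        · right
          have hss : (stepF fd quiet md)^[k] ({x} : Finset Int) ⊂ (stepF fd quiet md)^[k+1] ({x} : Finset Int) :=
            (Finset.ssubset_iff_subset_ne).mpr ⟨iterate_succ_sub fd quiet md _ k, heq⟩
          have := Finset.card_lt_card hss
          omega
  rcases key ((nodeUniv fd node).toFinset.card) with ⟨j, hj, hfix⟩ | hcard
  · exact ⟨j, hj, hfix⟩
  · exfalso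
    have hsub : (stepF fd quiet md)^[(nodeUniv fd node).toFinset.card] ({x} : Finset Int) ⊆ (nodeUniv fd node).toFinset :=
      iterate_univ fd node quiet md {x} (by simpa using hx) _
    have := Finset.card_le_card hsub
    omega

theorem reach_fixed (fd : List (Int × Int × List Int)) (node : Int) (quiet : List Int)
    (md : PySem.Dict Int (Int × Int)) (x : Int) (hx : x ∈ (nodeUniv fd node).toFinset)
    (N : ℕ) (hN : (nodeUniv fd node).toFinset.card ≤ N) :
    stepF fd quiet md (reachF fd quiet md N x) = reachF fd quiet md N x := by
  obtain ⟨j, hj, hfix⟩ := exists_fix fd node quiet md x hx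
  have h1 : reachF fd quiet md N x = (stepF fd quiet md)^[j] ({x} : Finset Int) :=
    fixed_propagate fd quiet md {x} j hfix N (by omega)
  rw [reachF] at h1 ⊢
  rw [h1]
  exact ((Function.iterate_succ_apply' (stepF fd quiet md) j {x}).symm).trans hfix.symm

theorem mem_reach_self (fd : List (Int × Int × List Int)) (quiet : List Int)
    (md : PySem.Dict Int (Int × Int)) (N : ℕ) (x : Int) : x ∈ reachF fd quiet md N x := by
  have : ({x} : Finset Int) ⊆ reachF fd quiet md N x := iterate_le_sub fd quiet md {x} 0 N (by omega)
  exact this (Finset.mem_singleton_self x)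

theorem reach_min (fd : List (Int × Int × List Int)) (quiet : List Int)
    (md : PySem.Dict Int (Int × Int)) (N : ℕ) (x : Int) (C : Finset Int)
    (hxC : x ∈ C) (hC : stepF fd quiet md C ⊆ C) : reachF fd quiet md N x ⊆ C := by
  rw [reachF]
  induction N with
  | zero => simpa using hxC
  | succ k ih =>
    rw [Function.iterate_succ_apply']
    exact (step_mono fd quiet md _ C ih).trans hC

theorem closed_succs (fd : List (Int × Int × List Int)) (quiet : List Int)
    (md : PySem.Dict Int (Int × Int)) (S : Finset Int) (hS : stepF fd quiet md S = S)
    (n : Int) (hn : n ∈ S) (hmd : md.get? n = none) :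
    ∀ s ∈ (succsOf fd quiet n).getD [], s ∈ S := by
  intro s hs
  rw [← hS]
  apply Finset.mem_union_right
  refine Finset.mem_biUnion.mpr ⟨n, hn, ?_⟩
  rw [hmd]
  simpa using hs

theorem reach_sub_reach (fd : List (Int × Int × List Int)) (node : Int) (quiet : List Int)
    (md : PySem.Dict Int (Int × Int)) (x : Int) (hx : x ∈ (nodeUniv fd node).toFinset)
    (N : ℕ) (hN : (nodeUniv fd node).toFinset.card ≤ N) (m : Int)
    (hm : m ∈ reachF fd quiet md N x) : reachF fd quiet md N m ⊆ reachF fd quiet md N x :=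
  reach_min fd quiet md N m _ hm (Finset.subset_of_eq (reach_fixed fd node quiet md x hx N hN))

theorem reach_memo (fd : List (Int × Int × List Int)) (quiet : List Int)
    (md : PySem.Dict Int (Int × Int)) (N : ℕ) (m : Int) (hmd : (md.get? m).isSome = true) :
    reachF fd quiet md N m = {m} := by
  have hstep : stepF fd quiet md ({m} : Finset Int) = {m} := by
    rw [stepF]
    simp [hmd]
  rw [reachF]
  induction N with
  | zero => rfl
  | succ k ih => rw [Function.iterate_succ_apply', ih, hstep]

-- ===== the common value: min over the reachable set =====
def wLex (quiet : List Int) (md : PySem.Dict Int (Int × Int)) (m : Int) : Int ×ₗ Int :=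
  toLex (contribD quiet md m)

def unionR (fd : List (Int × Int × List Int)) (quiet : List Int) (md : PySem.Dict Int (Int × Int))
    (N : ℕ) (l : List Int) : Finset Int :=
  l.foldl (fun T s => T ∪ reachF fd quiet md N s) ∅

theorem mem_foldl_union (r : Int → Finset Int) :
    ∀ (l : List Int) (T0 : Finset Int) (m : Int),
      m ∈ l.foldl (fun T s => T ∪ r s) T0 ↔ m ∈ T0 ∨ ∃ s ∈ l, m ∈ r s := by
  intro l
  induction l with
  | nil => simp
  | cons s l ih =>
    intro T0 m
    simp only [List.foldl, ih, Finset.mem_union, List.mem_cons]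
    constructor
    · rintro ((h | h) | ⟨s', hs', h⟩)
      · exact Or.inl h
      · exact Or.inr ⟨s, Or.inl rfl, h⟩
      · exact Or.inr ⟨s', Or.inr hs', h⟩
    · rintro (h | ⟨s', (rfl | hs'), h⟩)
      · exact Or.inl (Or.inl h)
      · exact Or.inl (Or.inr h)
      · exact Or.inr ⟨s', hs', h⟩

theorem mem_unionR (fd : List (Int × Int × List Int)) (quiet : List Int) (md : PySem.Dict Int (Int × Int))
    (N : ℕ) (l : List Int) (m : Int) :
    m ∈ unionR fd quiet md N l ↔ ∃ s ∈ l, m ∈ reachF fd quiet md N s := by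
  rw [unionR, mem_foldl_union]
  simp

theorem succsOf_some_elim (fd : List (Int × Int × List Int)) (quiet : List Int) (n : Int)
    (ss : List Int) (h : succsOf fd quiet n = some ss) :
    ∃ q, PySem.List.pyGet? quiet n = some q ∧ fdLookup fd (n, q) = some ss := by
  rw [succsOf] at h
  rcases hq : PySem.List.pyGet? quiet n with _ | q
  · rw [hq] at h; exact absurd h (by simp)
  · rw [hq] at h; exact ⟨q, rfl, h⟩

-- decomposition of the reachable set at a non-memoized node
theorem reach_decomp (fd : List (Int × Int × List Int)) (node : Int) (quiet : List Int)
    (md : PySem.Dict Int (Int × Int)) (N : ℕ) (hN : (nodeUniv fd node).toFinset.card ≤ N)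
    (n : Int) (hnU : n ∈ (nodeUniv fd node).toFinset) (hmd : md.get? n = none)
    (ss : List Int) (hss : succsOf fd quiet n = some ss) :
    reachF fd quiet md N n = insert n (unionR fd quiet md N ss) := by
  have hfix : stepF fd quiet md (reachF fd quiet md N n) = reachF fd quiet md N n :=
    reach_fixed fd node quiet md n hnU N hN
  have hsucc_mem : ∀ s ∈ ss, s ∈ reachF fd quiet md N n := by
    intro s hs
    have : s ∈ (succsOf fd quiet n).getD [] := by rw [hss]; simpa using hs
    exact closed_succs fd quiet md _ hfix n (mem_reach_self fd quiet md N n) hmd s this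
  apply Finset.Subset.antisymm
  · -- ⊆ : the right side is closed and contains n
    refine reach_min fd quiet md N n _ (Finset.mem_insert_self n _) ?_
    intro m' hm'
    rcases Finset.mem_union.mp hm' with h | h
    · exact h
    · obtain ⟨m, hmC, hm'succ⟩ := Finset.mem_biUnion.mp h
      rcases hmdm : md.get? m with _ | u
      swap
      · rw [hmdm] at hm'succ; simp at hm'succ
      rw [hmdm] at hm'succ
      simp only [Option.isSome_none, Bool.false_eq_true, ite_false] at hm'succ
      have hm'el : m' ∈ (succsOf fd quiet m).getD [] := List.mem_toFinset.mp (by simpa using hm'succ)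
      rcases Finset.mem_insert.mp hmC with rfl | hmu
      · -- m = n : successors of n land in their own reach sets
        have : m' ∈ ss := by rw [hss] at hm'el; simpa using hm'el
        exact Finset.mem_insert_of_mem ((mem_unionR fd quiet md N ss m').mpr
          ⟨m', this, mem_reach_self fd quiet md N m'⟩)
      · -- m in some reach s : that set is closed
        obtain ⟨s, hsl, hms⟩ := (mem_unionR fd quiet md N ss m).mp hmu
        have hsU : s ∈ (nodeUniv fd node).toFinset :=
          succs_mem_univ fd node quiet n s (by rw [hss]; simpa using hsl)
        have hfixs : stepF fd quiet md (reachF fd quiet md N s) = reachF fd quiet md N s :=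
          reach_fixed fd node quiet md s hsU N hN
        have : m' ∈ reachF fd quiet md N s :=
          closed_succs fd quiet md _ hfixs m hms hmdm m' hm'el
        exact Finset.mem_insert_of_mem ((mem_unionR fd quiet md N ss m').mpr ⟨s, hsl, this⟩)
  · -- ⊇
    intro m hm
    rcases Finset.mem_insert.mp hm with rfl | hmu
    · exact mem_reach_self fd quiet md N m
    · obtain ⟨s, hsl, hms⟩ := (mem_unionR fd quiet md N ss m).mp hmu
      exact reach_sub_reach fd node quiet md n hnU N hN s (hsucc_mem s hsl) hms

theorem reach_card_lt (fd : List (Int × Int × List Int)) (node : Int) (quiet : List Int)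
    (md : PySem.Dict Int (Int × Int)) (N : ℕ) (hN : (nodeUniv fd node).toFinset.card ≤ N)
    (n : Int) (hnU : n ∈ (nodeUniv fd node).toFinset) (hmd : md.get? n = none)
    (ss : List Int) (hss : succsOf fd quiet n = some ss) (s : Int) (hs : s ∈ ss)
    (hcyc : n ∉ reachF fd quiet md N s) :
    (reachF fd quiet md N s).card < (reachF fd quiet md N n).card := by
  have hfix : stepF fd quiet md (reachF fd quiet md N n) = reachF fd quiet md N n :=
    reach_fixed fd node quiet md n hnU N hN
  have hsmem : s ∈ reachF fd quiet md N n := by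
    refine closed_succs fd quiet md _ hfix n (mem_reach_self fd quiet md N n) hmd s ?_
    rw [hss]; simpa using hs
  have hsub : reachF fd quiet md N s ⊆ reachF fd quiet md N n :=
    reach_sub_reach fd node quiet md n hnU N hN s hsmem
  refine Finset.card_lt_card (Finset.ssubset_iff_of_subset hsub |>.mpr ⟨n, mem_reach_self fd quiet md N n, hcyc⟩)

-- fold-min bounds
theorem foldl_min_le_init (g : Int → Int ×ₗ Int) :
    ∀ (l : List Int) (a : Int ×ₗ Int), l.foldl (fun x s => min x (g s)) a ≤ a := by
  intro l
  induction l with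
  | nil => intro a; exact le_rfl
  | cons s l ih => intro a; exact (ih (min a (g s))).trans (min_le_left a (g s))

theorem foldl_min_le_mem (g : Int → Int ×ₗ Int) :
    ∀ (l : List Int) (a : Int ×ₗ Int) (s : Int), s ∈ l → l.foldl (fun x s => min x (g s)) a ≤ g s := by
  intro l
  induction l with
  | nil => intro a s hs; simp at hs
  | cons t l ih =>
    intro a s hs
    rcases List.mem_cons.mp hs with rfl | hs
    · exact (foldl_min_le_init g l (min a (g s))).trans (min_le_right a (g s))
    · exact ih (min a (g t)) s hs

theorem le_foldl_min (g : Int → Int ×ₗ Int) :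
    ∀ (l : List Int) (a z : Int ×ₗ Int), z ≤ a → (∀ s ∈ l, z ≤ g s) →
      z ≤ l.foldl (fun x s => min x (g s)) a := by
  intro l
  induction l with
  | nil => intro a z hz _; exact hz
  | cons s l ih =>
    intro a z hz hl
    exact ih (min a (g s)) z (le_min hz (hl s (by simp))) (fun t ht => hl t (by simp [ht]))

theorem contribD_memo (quiet : List Int) (md : PySem.Dict Int (Int × Int)) (n : Int) (v : Int × Int)
    (h : md.get? n = some v) : contribD quiet md n = v := by
  rw [contribD, h]

theorem contribD_nonmemo (quiet : List Int) (md : PySem.Dict Int (Int × Int)) (n q : Int)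
    (hmd : md.get? n = none) (hq : PySem.List.pyGet? quiet n = some q) :
    contribD quiet md n = (q, n) := by
  rw [contribD, hmd]
  simp [PySem.List.pyGetD, hq]

theorem tv_fold_val (fd : List (Int × Int × List Int)) (quiet : List Int) (md : PySem.Dict Int (Int × Int))
    (f : ℕ) (val : Int → Int × Int) :
    ∀ (ss : List Int) (init : Int × Int), (∀ s ∈ ss, tvF fd quiet md f s = some (val s)) →
      ss.foldl (fun acc s =>
        match acc with
        | none => none
        | some mv =>
          match tvF fd quiet md f s with
          | none => none
          | some v => some (if pyLtP v mv then v else mv)) (some init)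
      = some (ofLex (ss.foldl (fun a s => min a (toLex (val s))) (toLex init))) := by
  intro ss
  induction ss with
  | nil => intro init _; rfl
  | cons s ssx ih =>
    intro init hs
    simp only [List.foldl]
    rw [hs s (by simp)]
    simp only []
    rw [ite_pyLtP]
    have := ih (ofLex (min (toLex init) (toLex (val s)))) (fun t ht => hs t (by simp [ht]))
    simpa using this

theorem tv_reach (fd : List (Int × Int × List Int)) (node : Int) (quiet : List Int)
    (md : PySem.Dict Int (Int × Int)) (N : ℕ) (hN : (nodeUniv fd node).toFinset.card ≤ N)
    (hPre : ∀ n ∈ reachF fd quiet md N node, (md.get? n).isSome = true ∨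
      ((succsOf fd quiet n).isSome = true ∧ ∀ s ∈ (succsOf fd quiet n).getD [],
        n ∉ reachF fd quiet md N s)) :
    ∀ c n, n ∈ reachF fd quiet md N node → (reachF fd quiet md N n).card ≤ c →
      tvF fd quiet md ((reachF fd quiet md N n).card) n =
        some (ofLex ((reachF fd quiet md N n).inf'
          ⟨n, mem_reach_self fd quiet md N n⟩ (wLex quiet md))) := by
  intro c
  induction c with
  | zero =>
    intro n hn hc
    have : 0 < (reachF fd quiet md N n).card :=
      Finset.card_pos.mpr ⟨n, mem_reach_self fd quiet md N n⟩
    omega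
  | succ c ih =>
    intro n hn hcard
    have hnodeU : node ∈ (nodeUniv fd node).toFinset := by simp [nodeUniv]
    have hnU : n ∈ (nodeUniv fd node).toFinset :=
      iterate_univ fd node quiet md {node} (by simpa using hnodeU) N hn
    rcases hmd : md.get? n with _ | v
    case some =>
      -- memoized node: reach = {n}, value = stored value
      have hr : reachF fd quiet md N n = {n} := reach_memo fd quiet md N n (by simp [hmd])
      have h1 : (reachF fd quiet md N n).card = 1 := by rw [hr]; rfl
      have h2 : (reachF fd quiet md N n).inf' ⟨n, mem_reach_self fd quiet md N n⟩ (wLex quiet md)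
          = wLex quiet md n := by
        apply le_antisymm
        · exact Finset.inf'_le _ (mem_reach_self fd quiet md N n)
        · refine Finset.le_inf' _ _ (fun b hb => ?_)
          rw [hr] at hb
          rw [Finset.mem_singleton.mp hb]
      rw [h1, h2]
      rw [show (1 : ℕ) = 0 + 1 from rfl, tvF_memo fd quiet md 0 n v hmd]
      rw [wLex, contribD_memo quiet md n v hmd]
      rfl
    -- non-memoized node
    have hPn := hPre n hn
    rcases hPn with hm | ⟨hvs, hcyc⟩
    · rw [hmd] at hm; simp at hm
    rcases hso : succsOf fd quiet n with _ | ss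
    · rw [hso] at hvs; simp at hvs
    obtain ⟨q, hq, hfdl⟩ := succsOf_some_elim fd quiet n ss hso
    have hdecomp := reach_decomp fd node quiet md N hN n hnU hmd ss hso
    have hfix : stepF fd quiet md (reachF fd quiet md N n) = reachF fd quiet md N n :=
      reach_fixed fd node quiet md n hnU N hN
    have hsubnode : reachF fd quiet md N n ⊆ reachF fd quiet md N node :=
      reach_sub_reach fd node quiet md node hnodeU N hN n hn
    have hsmem : ∀ s ∈ ss, s ∈ reachF fd quiet md N n := by
      intro s hs
      refine closed_succs fd quiet md _ hfix n (mem_reach_self fd quiet md N n) hmd s ?_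
      rw [hso]; simpa using hs
    have hlt : ∀ s ∈ ss, (reachF fd quiet md N s).card < (reachF fd quiet md N n).card := by
      intro s hs
      refine reach_card_lt fd node quiet md N hN n hnU hmd ss hso s hs ?_
      exact hcyc s (by rw [hso]; simpa using hs)
    obtain ⟨k, hk⟩ : ∃ k, (reachF fd quiet md N n).card = k + 1 := by
      have : 0 < (reachF fd quiet md N n).card :=
        Finset.card_pos.mpr ⟨n, mem_reach_self fd quiet md N n⟩
      exact ⟨(reachF fd quiet md N n).card - 1, by omega⟩
    -- the per-successor values
    have hchild : ∀ s ∈ ss, tvF fd quiet md k s =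
        some (ofLex ((reachF fd quiet md N s).inf'
          ⟨s, mem_reach_self fd quiet md N s⟩ (wLex quiet md))) := by
      intro s hs
      have h1 := ih s (hsubnode (hsmem s hs)) (by have := hlt s hs; omega)
      exact tvF_le fd quiet md _ k s _ (by have := hlt s hs; omega) h1
    rw [hk, tvF_go fd quiet md k n q ss hmd hq hfdl]
    rw [tv_fold_val fd quiet md k
      (fun s => ofLex ((reachF fd quiet md N s).inf' ⟨s, mem_reach_self fd quiet md N s⟩ (wLex quiet md)))
      ss (q, n) hchild]
    congr 1
    have hwn : wLex quiet md n = toLex ((q, n) : Int × Int) := by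
      rw [wLex, contribD_nonmemo quiet md n q hmd hq]
    -- X = inf' over reach n
    apply congrArg
    apply le_antisymm
    · -- fold ≤ inf'
      refine Finset.le_inf' _ _ (fun b hb => ?_)
      rw [hdecomp] at hb
      rcases Finset.mem_insert.mp hb with rfl | hbu
      · have h0 := foldl_min_le_init
          (fun s => toLex (ofLex ((reachF fd quiet md N s).inf' ⟨s, mem_reach_self fd quiet md N s⟩ (wLex quiet md))))
          ss (toLex ((q, b) : Int × Int))
        rw [hwn]
        simpa using h0
      · obtain ⟨s, hsl, hbs⟩ := (mem_unionR fd quiet md N ss b).mp hbu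
        have h0 := foldl_min_le_mem
          (fun s => toLex (ofLex ((reachF fd quiet md N s).inf' ⟨s, mem_reach_self fd quiet md N s⟩ (wLex quiet md))))
          ss (toLex ((q, n) : Int × Int)) s hsl
        exact le_trans h0 (Finset.inf'_le _ hbs)
    · -- inf' ≤ fold
      refine le_foldl_min _ ss _ _ ?_ ?_
      · rw [← hwn]
        exact Finset.inf'_le _ (mem_reach_self fd quiet md N n)
      · intro s hsl
        show _ ≤ (reachF fd quiet md N s).inf' ⟨s, mem_reach_self fd quiet md N s⟩ (wLex quiet md)
        refine Finset.le_inf' _ _ (fun b hb => ?_)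
        have hbm : b ∈ reachF fd quiet md N n :=
          reach_sub_reach fd node quiet md n hnU N hN s (hsmem s hsl) hb
        exact Finset.inf'_le _ hbm

-- characterization of the inner append-fold of bfsLoop
theorem bfs_fold :
    ∀ (l seen : List Int),
      (let p := l.foldl (fun p s => if PySem.Set.contains p.2 s then p
                         else (p.1 ++ [s], PySem.Set.add p.2 s)) (seen, (seen : PySem.Set Int));
       ∃ t, p.1 = seen ++ t ∧ p.2 = (p.1 : List Int) ∧ (∀ x ∈ t, x ∈ l) ∧
         (∀ s ∈ l, s ∈ p.1) ∧ (seen.Nodup → p.1.Nodup)) := by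
  intro l
  induction l with
  | nil => intro seen; exact ⟨[], by simp, rfl, by simp, by simp, fun h => by simpa using h⟩
  | cons s lx ih =>
    intro seen
    simp only [List.foldl]
    by_cases hs : s ∈ seen
    · rw [if_pos (by simpa [PySem.Set.contains_iff] using hs)]
      obtain ⟨t, h1, h2, h3, h4, h5⟩ := ih seen
      exact ⟨t, h1, h2, fun x hx => by simp [h3 x hx],
        fun u hu => by rcases List.mem_cons.mp hu with rfl | hu; · exact h1 ▸ List.mem_append_left t hs
                       · exact h4 u hu, h5⟩
    · rw [if_neg (by simpa [PySem.Set.contains_iff] using hs)]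
      rw [PySem.Set.add_of_not_mem hs]
      obtain ⟨t, h1, h2, h3, h4, h5⟩ := ih (seen ++ [s])
      refine ⟨s :: t, by simpa using h1, h2, ?_, ?_, ?_⟩
      · intro x hx
        rcases List.mem_cons.mp hx with rfl | hx
        · simp
        · simp [h3 x hx]
      · intro u hu
        rcases List.mem_cons.mp hu with rfl | hu
        · exact h1 ▸ List.mem_append_left t (by simp)
        · exact h4 u hu
      · intro hnd
        refine h5 (by simp [List.nodup_append, hnd]; exact fun a ha heq => hs (heq ▸ ha))

-- main loop characterization
theorem bfs_main (fd : List (Int × Int × List Int)) (node : Int) (quiet : List Int)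
    (md : PySem.Dict Int (Int × Int)) (N : ℕ) (hN : (nodeUniv fd node).toFinset.card ≤ N) :
    ∀ (fuel : ℕ) (seen : List Int) (i : ℕ),
      seen.Nodup →
      (∀ m ∈ seen, m ∈ reachF fd quiet md N node) →
      i ≤ seen.length →
      (nodeUniv fd node).toFinset.card + 1 ≤ fuel + i →
      (∀ j, j < i → j < seen.length → md.get? (seen.getD j 0) = none →
        ∀ s ∈ (succsOf fd quiet (seen.getD j 0)).getD [], s ∈ seen) →
      (∃ t, bfsLoop fd quiet md fuel seen (seen : PySem.Set Int) i = seen ++ t) ∧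
      (∀ m ∈ bfsLoop fd quiet md fuel seen (seen : PySem.Set Int) i, m ∈ reachF fd quiet md N node) ∧
      (∀ m ∈ bfsLoop fd quiet md fuel seen (seen : PySem.Set Int) i, md.get? m = none →
        ∀ s ∈ (succsOf fd quiet m).getD [], s ∈ bfsLoop fd quiet md fuel seen (seen : PySem.Set Int) i) := by
  have hRU : ∀ m, m ∈ reachF fd quiet md N node → m ∈ (nodeUniv fd node).toFinset := by
    intro m hm
    exact iterate_univ fd node quiet md {node} (by simp [nodeUniv]) N hm
  intro fuel
  induction fuel with
  | zero =>
    intro seen i hnd hR hi hfuel _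
    exfalso
    have hsub : seen.toFinset ⊆ (nodeUniv fd node).toFinset := by
      intro m hm; exact hRU m (hR m (List.mem_toFinset.mp hm))
    have := Finset.card_le_card hsub
    have := List.toFinset_card_of_nodup hnd
    omega
  | succ fuel ih =>
    intro seen i hnd hR hi hfuel hproc
    by_cases hil : i < seen.length
    · rw [bfsLoop, if_pos hil]
      rcases hmd : md.get? (seen.getD i 0) with _ | v
      ·
        -- expand successors of seen[i]
        simp only [hmd]
        obtain ⟨t, h1, h2, h3, h4, h5⟩ := bfs_fold ((succsOf fd quiet (seen.getD i 0)).getD []) seen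
        have hnmem : seen.getD i 0 ∈ reachF fd quiet md N node :=
          hR _ (List.getD_eq_getElem seen 0 hil ▸ List.getElem_mem hil)
        have hfixnode : stepF fd quiet md (reachF fd quiet md N node) = reachF fd quiet md N node :=
          reach_fixed fd node quiet md node (by simp [nodeUniv]) N hN
        have hsuccR : ∀ s ∈ (succsOf fd quiet (seen.getD i 0)).getD [], s ∈ reachF fd quiet md N node :=
          closed_succs fd quiet md _ hfixnode _ hnmem hmd
        have hcall := ih (seen ++ t) (i+1)
          (h1 ▸ h5 hnd)
          (by intro m hm
              rcases List.mem_append.mp hm with hm | hm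
              · exact hR m hm
              · exact hsuccR m (h3 m hm))
          (by have : seen.length ≤ (seen ++ t).length := by simp
              omega)
          (by omega)
          (by intro j hj hjl hmdj s hsj
              by_cases hjo : j < seen.length
              · rw [List.getD_append seen t 0 j hjo] at hmdj hsj
                by_cases hji : j < i
                · exact List.mem_append_left t (hproc j hji hjo hmdj s hsj)
                · have : j = i := by omega
                  subst this
                  exact h1 ▸ h4 s hsj
              · omega)
        rw [h2, h1]
        obtain ⟨⟨t2, hL⟩, hc2, hc3⟩ := hcall
        exact ⟨⟨t ++ t2, by simpa using hL⟩, hc2, hc3⟩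
      ·
        simp only [hmd]
        have hcall := ih seen (i+1) hnd hR (by omega) (by omega)
          (by intro j hj hjl hmdj s hsj
              by_cases hji : j < i
              · exact hproc j hji hjl hmdj s hsj
              · have : j = i := by omega
                subst this
                rw [hmdj] at hmd
                exact absurd hmd (by simp))
        exact hcall
    · rw [bfsLoop, if_neg hil]
      have hieq : i = seen.length := by omega
      refine ⟨⟨[], by simp⟩, hR, ?_⟩
      intro m hm hmdm s hs
      obtain ⟨j, hjl, hje⟩ := List.mem_iff_getElem.mp hm
      have hgd : seen.getD j 0 = m := by rw [List.getD_eq_getElem seen 0 hjl, hje]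
      exact hproc j (by omega) hjl (hgd ▸ hmdm) s (hgd ▸ hs)

theorem inf'_congr_set (S T : Finset Int) (h : S = T) (f : Int → Int ×ₗ Int)
    (HS : S.Nonempty) (HT : T.Nonempty) : S.inf' HS f = T.inf' HT f := by subst h; rfl

theorem best_fold_acc (quiet : List Int) (md : PySem.Dict Int (Int × Int)) :
    ∀ (xs : List Int) (b : Int × Int),
      xs.foldl (fun best n =>
        let cand := contribD quiet md n
        match best with
        | none => some cand
        | some b => some (if pyLtP cand b then cand else b)) (some b)
      = some (ofLex (xs.foldl (fun a n => min a (wLex quiet md n)) (toLex b))) := by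
  intro xs
  induction xs with
  | nil => intro b; rfl
  | cons n xs ih =>
    intro b
    simp only [List.foldl]
    rw [ite_pyLtP]
    have := ih (ofLex (min (toLex b) (toLex (contribD quiet md n))))
    simpa [wLex] using this

theorem best_fold_eq_inf (quiet : List Int) (md : PySem.Dict Int (Int × Int)) (x : Int) (xs : List Int) :
    (x :: xs).foldl (fun best n =>
        let cand := contribD quiet md n
        match best with
        | none => some cand
        | some b => some (if pyLtP cand b then cand else b)) none
      = some (ofLex (((x :: xs).toFinset).inf' (by simp) (wLex quiet md))) := by
  simp only [List.foldl]
  rw [best_fold_acc quiet md xs (contribD quiet md x)]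
  congr 1
  apply congrArg
  apply le_antisymm
  · refine Finset.le_inf' _ _ (fun b hb => ?_)
    rcases List.mem_cons.mp (List.mem_toFinset.mp hb) with rfl | h
    · exact foldl_min_le_init (wLex quiet md) xs (toLex (contribD quiet md b))
    · exact foldl_min_le_mem (wLex quiet md) xs (toLex (contribD quiet md x)) b h
  · refine le_foldl_min _ xs _ _ ?_ ?_
    · exact Finset.inf'_le _ (by simp)
    · intro s hs
      exact Finset.inf'_le _ (by simp [hs])

theorem DFS_alt_val (fd : List (Int × Int × List Int)) (node : Int) (quiet : List Int)
    (memo : List (Int × Int × Int)) (hmd : (memoDict memo).get? node = none) :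
    DFS_alt fd node quiet memo =
      ofLex ((reachF fd quiet (memoDict memo) (fuelN fd node) node).inf'
        ⟨node, mem_reach_self fd quiet (memoDict memo) (fuelN fd node) node⟩
        (wLex quiet (memoDict memo))) := by
  have hN : (nodeUniv fd node).toFinset.card ≤ fuelN fd node := Nat.le_succ _
  have hbfs := bfs_main fd node quiet (memoDict memo) (fuelN fd node) hN (fuelN fd node)
    [node] 0 (by simp)
    (by intro m hm
        rw [List.mem_singleton.mp hm]
        exact mem_reach_self fd quiet (memoDict memo) (fuelN fd node) node)
    (by simp) (by simp [fuelN]) (by omega)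
  obtain ⟨⟨t, hL⟩, hall, hclosed⟩ := hbfs
  have hTF : (bfsLoop fd quiet (memoDict memo) (fuelN fd node) [node] ([node] : PySem.Set Int) 0).toFinset
      = reachF fd quiet (memoDict memo) (fuelN fd node) node := by
    apply Finset.Subset.antisymm
    · intro m hm
      exact hall m (List.mem_toFinset.mp hm)
    · refine reach_min fd quiet (memoDict memo) (fuelN fd node) node _ ?_ ?_
      · rw [hL]; simp
      · intro m' hm'
        rcases Finset.mem_union.mp hm' with h | h
        · exact h
        · obtain ⟨m, hmC, hm's⟩ := Finset.mem_biUnion.mp h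
          rcases hmdm : (memoDict memo).get? m with _ | u
          · rw [hmdm] at hm's
            simp only [Option.isSome_none, Bool.false_eq_true, ite_false] at hm's
            exact List.mem_toFinset.mpr
              (hclosed m (List.mem_toFinset.mp hmC) hmdm m' (List.mem_toFinset.mp hm's))
          · rw [hmdm] at hm's; simp at hm's
  have hof : PySem.Set.ofList [node] = ([node] : PySem.Set Int) := rfl
  rw [DFS_alt, hmd]
  simp only []
  rw [hof, hL]
  rw [show ([node] ++ t : List Int) = node :: t from rfl]
  rw [best_fold_eq_inf quiet (memoDict memo) node t]
  simp only []
  apply congrArg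
  refine inf'_congr_set _ _ ?_ _ _ _
  rw [← hTF, hL]
  rfl

-- ===== VERDICT (by name: the statement is the Claim_ definition above) =====
theorem DFS_spec : Claim_equal_DFS := by
  intro fd node quiet memo hDom hPre
  show DFS fd node quiet memo = DFS_alt fd node quiet memo
  rcases hmd : (memoDict memo).get? node with _ | v
  · -- node not memoized: both sides compute the min over the reachable set
    have hN : (nodeUniv fd node).toFinset.card ≤ fuelN fd node := Nat.le_succ _
    unfold Pre_DFS at hPre
    have hval := tv_reach fd node quiet (memoDict memo) (fuelN fd node) hN hPre
      ((reachF fd quiet (memoDict memo) (fuelN fd node) node).card) node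
      (mem_reach_self fd quiet (memoDict memo) (fuelN fd node) node) le_rfl
    have hcard : (reachF fd quiet (memoDict memo) (fuelN fd node) node).card ≤ fuelN fd node := by
      have hsub : reachF fd quiet (memoDict memo) (fuelN fd node) node ⊆ (nodeUniv fd node).toFinset :=
        iterate_univ fd node quiet (memoDict memo) {node} (by simp [nodeUniv]) (fuelN fd node)
      have := Finset.card_le_card hsub
      omega
    have hA := DFS_eq_tv fd node quiet memo _
      (tvF_le fd quiet (memoDict memo) _ (fuelN fd node) node _ hcard hval)
    have hB := DFS_alt_val fd node quiet memo hmd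
    rw [hA, hB]
  · -- node memoized: both return memo[node]
    have h1 : DFS fd node quiet memo = v := by
      unfold DFS
      rw [show fuelN fd node = (nodeUniv fd node).toFinset.card + 1 from rfl]
      rw [dfsA_memo fd quiet _ node (memoDict memo) v hmd]
    have h2 : DFS_alt fd node quiet memo = v := by
      unfold DFS_alt
      rw [hmd]
    rw [h1, h2]
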